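-- pv_equiv track=rewrite | github.com/JustinTime42/stanley | src/testing/healing/repair_strategies/mock_repair.py | _add_mock_comments
-- ===== SOURCE A (Python) =====
-- def _add_mock_comments(code: str, root_cause: str) -> str:
--     """Add generic mock-related comments.
--
--     Args:
--         code: Original code
--         root_cause: Root cause description
--
--     Returns:
--         Code with comments added
--     """
--     lines = code.split("\n")
--     repaired_lines = []
--
--     mock_section_started = False
--
--     for line in lines:
--         # Detect mock-related lines
--         is_mock_line = any(
--             keyword in line.lower()
--             for keyword in [
--                 "mock",
--                 "patch",
--                 "mocker",
--                 "magicmock",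
--                 "return_value",
--                 "side_effect",
--             ]
--         )
--
--         if is_mock_line and not mock_section_started:
--             indent = len(line) - len(line.lstrip())
--             indent_str = " " * indent
--
--             repaired_lines.append(
--                 f"{indent_str}# FIXME: Mock configuration may need updating"
--             )
--             repaired_lines.append(f"{indent_str}# Issue: {root_cause}")
--             mock_section_started = True
--
--         repaired_lines.append(line)
--
--     return "\n".join(repaired_lines)
-- ===== SOURCE B (Python) =====
-- def _add_mock_comments(code: str, root_cause: str) -> str:
--     """Add generic mock-related comments (insert FIXME before first mock line)."""
--     keywords = ["mock", "patch", "mocker", "magicmock", "return_value", "side_effect"]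
--     lines = code.split("\n")
--     i = next(
--         (idx for idx, line in enumerate(lines)
--          if any(keyword in line.lower() for keyword in keywords)),
--         None,
--     )
--     if i is None:
--         return "\n".join(lines)
--     line = lines[i]
--     indent_str = " " * (len(line) - len(line.lstrip()))
--     comments = [
--         f"{indent_str}# FIXME: Mock configuration may need updating",
--         f"{indent_str}# Issue: {root_cause}",
--     ]
--     return "\n".join(lines[:i] + comments + lines[i:])
-- ===== Notes on version B (the rewrite author's own statement) =====
-- stated objective: simpler
-- what changed: Replaces the stateful line-by-line rebuild (flag + accumulator loop) with a direct search for the index of the first mock-matching line followed by a single slice-based insertion lines[:i] + comments + lines[i:].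
import Mathlib
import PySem

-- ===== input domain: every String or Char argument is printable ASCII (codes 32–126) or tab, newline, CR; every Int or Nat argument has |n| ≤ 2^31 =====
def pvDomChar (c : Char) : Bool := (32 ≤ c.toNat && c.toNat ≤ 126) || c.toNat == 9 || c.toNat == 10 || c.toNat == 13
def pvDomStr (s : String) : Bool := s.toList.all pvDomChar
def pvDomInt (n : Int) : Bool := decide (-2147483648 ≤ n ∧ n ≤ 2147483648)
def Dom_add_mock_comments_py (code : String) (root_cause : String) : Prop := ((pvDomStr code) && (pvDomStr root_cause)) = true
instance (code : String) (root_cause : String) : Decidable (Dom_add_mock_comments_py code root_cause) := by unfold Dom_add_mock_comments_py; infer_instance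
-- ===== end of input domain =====

-- B replaces A's flag-and-accumulator rebuild loop by a search for the first
-- mock-matching line index plus one slice-based insertion (objective: simpler).

-- ===== PORT A =====
-- shared keyword test: any(keyword in line.lower() for keyword in [...])
def pvMockKeywords : List String :=
  ["mock", "patch", "mocker", "magicmock", "return_value", "side_effect"]

def pvIsMockLine (line : String) : Bool :=
  pvMockKeywords.any (fun kw => PySem.Str.isIn kw (PySem.Str.lower line))

-- indent_str = " " * (len(line) - len(line.lstrip()))
def pvIndentStr (line : String) : String :=
  String.ofList (List.replicate (PySem.Str.len line - PySem.Str.len (PySem.Str.lstrip line)).toNat ' ')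

-- f"{indent_str}# FIXME: Mock configuration may need updating"
def pvFixmeLine (line : String) : String :=
  pvIndentStr line ++ "# FIXME: Mock configuration may need updating"

-- f"{indent_str}# Issue: {root_cause}"
def pvIssueLine (line : String) (root_cause : String) : String :=
  pvIndentStr line ++ "# Issue: " ++ root_cause

-- A's loop body: state = (repaired_lines, mock_section_started)
def pvStepA (root_cause : String) (st : List String × Bool) (line : String) :
    List String × Bool :=
  if pvIsMockLine line && !st.2 then
    (st.1 ++ [pvFixmeLine line, pvIssueLine line root_cause, line], true)
  else
    (st.1 ++ [line], st.2)

def add_mock_comments_py (code : String) (root_cause : String) : String :=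
  -- code.split("\n"): sep is the nonempty literal, so split? is always some
  let lines := (PySem.Str.split? code "\n").getD []
  let st := lines.foldl (pvStepA root_cause) ([], false)
  PySem.Str.join "\n" st.1

-- ===== PORT B =====
def add_mock_comments_py_alt (code : String) (root_cause : String) : String :=
  let lines := (PySem.Str.split? code "\n").getD []
  -- i = next((idx for idx, line in enumerate(lines) if <mock test>), None)
  match lines.findIdx? pvIsMockLine with
  | none => PySem.Str.join "\n" lines
  | some i =>
      let line := lines.getD i ""    -- lines[i], i a valid found index
      PySem.Str.join "\n"
        (lines.take i ++ [pvFixmeLine line, pvIssueLine line root_cause] ++ lines.drop i)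

-- ===== PRECONDITION & SPEC =====
def Spec_add_mock_comments_py (code : String) (root_cause : String) (out : String) : Prop := out = add_mock_comments_py_alt code root_cause
instance (code : String) (root_cause : String) (out : String) : Decidable (Spec_add_mock_comments_py code root_cause out) := by unfold Spec_add_mock_comments_py; infer_instance

-- ===== CLAIM (what is proved, stated in full; the proofs are below) =====
def Claim_equal_add_mock_comments_py : Prop := ∀ (code : String) (root_cause : String), Dom_add_mock_comments_py code root_cause → Spec_add_mock_comments_py code root_cause (add_mock_comments_py code root_cause)

-- ===== LEMMAS AND PROOFS =====

-- once mock_section_started is set, the loop only copies the remaining lines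
theorem pvLoop_started (rc : String) :
    ∀ (ls acc : List String), ls.foldl (pvStepA rc) (acc, true) = (acc ++ ls, true) := by
  intro ls
  induction ls with
  | nil => intro acc; simp
  | cons l ls ih =>
      intro acc
      have hstep : pvStepA rc (acc, true) l = (acc ++ [l], true) := by simp [pvStepA]
      rw [List.foldl_cons, hstep, ih]
      simp

-- with the flag still false, the loop's output is a slice insertion at the
-- first index whose line passes the mock test (or a plain copy if none does)
theorem pvLoop_false (rc : String) :
    ∀ (ls acc : List String),
      (ls.foldl (pvStepA rc) (acc, false)).1 =
        match ls.findIdx? pvIsMockLine with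
        | none => acc ++ ls
        | some i =>
            acc ++ (ls.take i ++
              [pvFixmeLine (ls.getD i ""), pvIssueLine (ls.getD i "") rc] ++ ls.drop i) := by
  intro ls
  induction ls with
  | nil => intro acc; simp
  | cons l ls ih =>
      intro acc
      by_cases h : pvIsMockLine l
      · have hstep : pvStepA rc (acc, false) l
            = (acc ++ [pvFixmeLine l, pvIssueLine l rc, l], true) := by simp [pvStepA, h]
        rw [List.foldl_cons, hstep, pvLoop_started rc]
        simp [List.findIdx?_cons, h]
      · have hstep : pvStepA rc (acc, false) l = (acc ++ [l], false) := by
          simp [pvStepA, h]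
        rw [List.foldl_cons, hstep, ih (acc ++ [l])]
        cases hfi : ls.findIdx? pvIsMockLine with
        | none => simp [List.findIdx?_cons, h, hfi]
        | some i => simp [List.findIdx?_cons, h, hfi, List.append_assoc]

-- ===== VERDICT (by name: the statement is the Claim_ definition above) =====
theorem add_mock_comments_py_spec : Claim_equal_add_mock_comments_py := by
  intro code root_cause _hdom
  unfold Spec_add_mock_comments_py add_mock_comments_py add_mock_comments_py_alt
  simp only [pvLoop_false root_cause]
  cases hfi : ((PySem.Str.split? code "\n").getD []).findIdx? pvIsMockLine with
  | none => simp
  | some i => simp
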